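-- pv_equiv track=rewrite | github.com/ray-lius/LeetCode-Python | basic/studentLine.py | calculate
-- ===== SOURCE A (Python) =====
-- def calculate(order, student):
--     #Code here
--     while order:
--         if order[-1] in student:
--             if order[-1] == student[-1]:
--                 order = order[:-1]
--                 student = student[:-1]
--             else:
--                 student_cur = student[-1]
--                 student = student_cur + student[:-1]
--         else:
--             break
--     return len(student)
-- ===== SOURCE B (Python) =====
-- def calculate(order, student):
--     cnt = {}
--     for ch in student:
--         cnt[ch] = cnt.get(ch, 0) + 1
--     removed = 0
--     for ch in reversed(order):
--         if cnt.get(ch, 0) > 0: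
--             cnt[ch] -= 1
--             removed += 1
--         else:
--             break
--     return len(student) - removed
-- ===== Notes on version B (the rewrite author's own statement) =====
-- stated objective: faster
-- what changed: B replaces A's queue-rotation simulation (rotate student until its last char matches order's last, pop both) by a one-pass count: build a character counter of student, scan order from the back decrementing counts until a char is absent; the whole rotation loop disappears.
import Mathlib
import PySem

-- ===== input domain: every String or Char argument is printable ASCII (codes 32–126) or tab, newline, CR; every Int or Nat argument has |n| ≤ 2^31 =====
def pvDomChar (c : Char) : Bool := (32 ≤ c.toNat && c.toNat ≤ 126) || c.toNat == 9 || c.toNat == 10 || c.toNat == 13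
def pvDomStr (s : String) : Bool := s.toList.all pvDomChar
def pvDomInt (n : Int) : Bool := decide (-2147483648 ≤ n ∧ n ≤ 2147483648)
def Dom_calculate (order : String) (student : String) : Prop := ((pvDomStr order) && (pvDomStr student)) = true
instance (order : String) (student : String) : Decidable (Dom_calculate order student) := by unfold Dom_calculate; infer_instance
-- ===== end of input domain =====

-- B replaces A's O(n*m) rotate-and-pop simulation by an O(n+m) counter scan of order reversed.

-- ===== PORT A =====
-- A's while-loop, on the REVERSED character lists (head = Python's s[-1]):
-- `order = order[:-1]` is the tail, `student = student[-1] + student[:-1]` is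
-- `rs.tail ++ [rs.head]` on the reversed list; branches in A's order, exact on every input.
def calcLoopA (ro : List Char) (rs : List Char) : Int :=
  match ro with
  | [] => (rs.length : Int)                       -- while order: exits
  | c :: ro' =>
    if c ∈ rs then                                 -- order[-1] in student
      match hrs : rs with
      | [] => (0 : Int)                            -- unreachable: c ∈ rs
      | d :: rs' =>
        if c = d then calcLoopA ro' rs'            -- pop both
        else calcLoopA (c :: ro') (rs' ++ [d])     -- rotate student
    else (rs.length : Int)                         -- break
termination_by (ro.length, rs.idxOf (ro.headD ' '))
decreasing_by
  · exact Prod.Lex.left _ _ (by simp)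
  · rename_i hmem hne
    apply Prod.Lex.right
    simp only [List.headD_cons]
    subst hrs
    have hc : c ∈ rs' := by simp at hmem; tauto
    rw [List.idxOf_append_of_mem hc, List.idxOf_cons_ne _ (fun e => hne e.symm)]
    omega

def calculate (order : String) (student : String) : Int :=
  calcLoopA order.toList.reverse student.toList.reverse

-- ===== PORT B =====
-- Source B's counter build: cnt = {}; for ch in student: cnt[ch] = cnt.get(ch, 0) + 1
def calcCount (s : List Char) : PySem.Dict Char Int :=
  s.foldl (fun m ch => m.insert ch (m.getD ch 0 + 1)) PySem.Dict.empty

-- Source B's second loop: for ch in reversed(order): decrement or break; returns `removed`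
def calcLoopB (cnt : PySem.Dict Char Int) (ro : List Char) : Int :=
  match ro with
  | [] => 0
  | c :: ro' =>
    if cnt.getD c 0 > 0 then calcLoopB (cnt.insert c (cnt.getD c 0 - 1)) ro' + 1
    else 0

def calculate_alt (order : String) (student : String) : Int :=
  (student.toList.length : Int) - calcLoopB (calcCount student.toList) order.toList.reverse

-- ===== PRECONDITION & SPEC =====
def Spec_calculate (order : String) (student : String) (out : Int) : Prop := out = calculate_alt order student
instance (order : String) (student : String) (out : Int) : Decidable (Spec_calculate order student out) := by unfold Spec_calculate; infer_instance

-- ===== CLAIM (what is proved, stated in full; the proofs are below) =====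
def Claim_equal_calculate : Prop := ∀ (order : String) (student : String), Dom_calculate order student → Spec_calculate order student (calculate order student)

-- ===== LEMMAS AND PROOFS =====

-- calcLoopB only looks at the dict through getD, so pointwise-equal dicts give equal results
theorem calcLoopB_congr (d1 d2 : PySem.Dict Char Int)
    (h : ∀ k, d1.getD k 0 = d2.getD k 0) (ro : List Char) :
    calcLoopB d1 ro = calcLoopB d2 ro := by
  induction ro generalizing d1 d2 with
  | nil => rfl
  | cons c ro' ih =>
    simp only [calcLoopB, h c]
    split
    · rw [ih]
      intro k
      simp [PySem.Dict.getD_insert, h k]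
    · rfl

theorem getD_calcCount (s : List Char) (k : Char) :
    (calcCount s).getD k 0 = (s.count k : Int) := by
  rw [calcCount, PySem.Dict.foldl_insert_getD_add_one_eq_counter, PySem.Dict.getD_counter]

-- A's loop steps, one equation per branch of the while-body
theorem loopA_pop (ro' : List Char) (d : Char) (rs' : List Char) (hmem : d ∈ d :: rs') :
    calcLoopA (d :: ro') (d :: rs') = calcLoopA ro' rs' := by
  rw [calcLoopA]; simp [hmem]

theorem loopA_rot (c : Char) (ro' : List Char) (d : Char) (rs' : List Char)
    (hne : ¬ c = d) (hmem : c ∈ d :: rs') :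
    calcLoopA (c :: ro') (d :: rs') = calcLoopA (c :: ro') (rs' ++ [d]) := by
  rw [calcLoopA]; simp [hmem, hne]

theorem loopA_break (rs : List Char) (c : Char) (ro' : List Char) (hmem : c ∉ rs) :
    calcLoopA (c :: ro') rs = rs.length := by
  rw [calcLoopA.eq_def]; simp [hmem]

-- the heart: A's rotate-and-pop loop computes |student| minus B's removal count
theorem loopA_eq (ro rs : List Char) :
    calcLoopA ro rs = (rs.length : Int) - calcLoopB (calcCount rs) ro := by
  induction ro, rs using calcLoopA.induct with
  | case1 rs => simp [calcLoopA, calcLoopB]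
  | case2 c ro' hmem => simp at hmem
  | case3 ro' d rs' hmem ih =>
    have hpos : (calcCount (d :: rs')).getD d 0 > 0 := by
      rw [getD_calcCount]; simp
    rw [loopA_pop ro' d rs' hmem, ih, calcLoopB, if_pos hpos]
    rw [calcLoopB_congr ((calcCount (d :: rs')).insert d ((calcCount (d :: rs')).getD d 0 - 1)) (calcCount rs')]
    · simp
    · intro k
      rw [PySem.Dict.getD_insert, getD_calcCount, getD_calcCount, getD_calcCount]
      by_cases hk : k = d
      · subst hk; simp
      · rw [if_neg hk]
        simp [List.count_cons]
        exact fun e => hk e.symm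
  | case4 c ro' d rs' hne hmem ih =>
    rw [loopA_rot c ro' d rs' hne hmem, ih]
    rw [calcLoopB_congr (calcCount (rs' ++ [d])) (calcCount (d :: rs'))]
    · simp
    · intro k
      rw [getD_calcCount, getD_calcCount]
      simp [List.count_append, List.count_cons]
  | case5 rs c ro' hmem =>
    have h0 : (calcCount rs).getD c 0 = 0 := by
      rw [getD_calcCount]
      simp [List.count_eq_zero_of_not_mem hmem]
    rw [loopA_break rs c ro' hmem, calcLoopB, if_neg (by omega)]
    omega

theorem calcCount_reverse (s : List Char) (ro : List Char) :
    calcLoopB (calcCount s.reverse) ro = calcLoopB (calcCount s) ro := by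
  apply calcLoopB_congr
  intro k
  rw [getD_calcCount, getD_calcCount, List.count_reverse]

-- ===== VERDICT (by name: the statement is the Claim_ definition above) =====
theorem calculate_spec : Claim_equal_calculate := by
  intro order student _
  unfold Spec_calculate calculate calculate_alt
  rw [loopA_eq, List.length_reverse, calcCount_reverse]
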